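-- pv_equiv track=rewrite | github.com/speedygonzalez777/resume-agent | app/services/resume_generation_service.py | _text_contains_unsupported_known_term
-- ===== SOURCE A (Python) =====
-- from typing import Iterable
--
-- def _normalize(value: str | None) -> str:
--     """Normalize a string for case-insensitive comparisons."""
--     if not value:
--         return ""
--     return value.strip().lower()
--
-- def _text_contains_unsupported_known_term(
--     text: str,
--     source_texts: Iterable[str | None],
--     known_terms: Iterable[str | None],
-- ) -> bool:
--     """Check whether generated text mentions a known term that is absent from its source."""
--     normalized_text = _normalize(text)
--     normalized_source_blob = " ".join(_normalize(source_text) for source_text in source_texts if source_text)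
--
--     for known_term in known_terms:
--         normalized_term = _normalize(known_term)
--         if len(normalized_term) < 3:
--             continue
--         if normalized_term in normalized_text and normalized_term not in normalized_source_blob:
--             return True
--
--     return False
-- ===== SOURCE B (Python) =====
-- def _text_contains_unsupported_known_term(text, source_texts, known_terms):
--     """Check whether generated text mentions a known term that is absent from its source."""
--     terms = {t for t in ((kt or "").strip().lower() for kt in known_terms) if len(t) >= 3}
--     if not terms:
--         return False
--     lengths = sorted({len(t) for t in terms})
--
--     def occurring(s):
--         # set of terms that occur as substrings of s, found by a sliding-window
--         # scan: at each start position, look up each candidate window length.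
--         hits = set()
--         n = len(s)
--         for i in range(n):
--             for L in lengths:
--                 if n < i + L:
--                     break
--                 sub = s[i:i + L]
--                 if sub in terms:
--                     hits.add(sub)
--         return hits
--
--     mentioned = occurring((text or "").strip().lower())
--     if not mentioned:
--         return False
--     blob = " ".join(s.strip().lower() for s in source_texts if s)
--     return not mentioned <= occurring(blob)
-- ===== Notes on version B (the rewrite author's own statement) =====
-- stated objective: alternative
-- what changed: A probes each known term against the text and the source blob with a per-term substring search; B inverts the traversal: it builds the set of normalized terms and their distinct lengths once, does a single sliding-window scan over the text (and, only if something was mentioned, over the blob) looking each window up in the term set, and compares the two hit sets with a subset test.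
import Mathlib
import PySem

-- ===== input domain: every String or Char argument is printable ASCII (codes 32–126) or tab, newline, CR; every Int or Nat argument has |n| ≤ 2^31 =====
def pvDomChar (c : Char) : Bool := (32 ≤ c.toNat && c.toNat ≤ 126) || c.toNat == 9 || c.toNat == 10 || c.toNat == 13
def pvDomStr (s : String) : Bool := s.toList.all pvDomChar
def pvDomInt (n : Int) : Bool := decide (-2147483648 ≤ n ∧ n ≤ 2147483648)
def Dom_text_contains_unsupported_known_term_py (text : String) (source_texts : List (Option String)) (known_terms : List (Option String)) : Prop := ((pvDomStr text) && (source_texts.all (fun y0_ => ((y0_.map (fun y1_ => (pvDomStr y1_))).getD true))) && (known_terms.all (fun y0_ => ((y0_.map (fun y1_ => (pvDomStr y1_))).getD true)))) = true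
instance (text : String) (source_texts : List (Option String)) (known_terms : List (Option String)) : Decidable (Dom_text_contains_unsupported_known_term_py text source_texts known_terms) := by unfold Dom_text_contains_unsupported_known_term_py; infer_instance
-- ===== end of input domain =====

-- B replaces A's per-term substring probes by the inverse traversal: build the set of normalized
-- terms and their distinct lengths once, slide a window over the text (and, only if something was
-- mentioned, over the source blob) looking each window up in the term set, and compare the two hit
-- sets with a subset test (objective: alternative; no speed claim).

-- ===== PORT A =====
-- _normalize(value): if not value: return ""; return value.strip().lower()
def pvNormalize : Option String → String
  | none => ""
  | some s => if s == "" then "" else PySem.Str.lower (PySem.Str.strip s)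

-- truthiness of a str|None value
def pvTruthy (v : Option String) : Bool := !(v.getD "" == "")

-- the for-loop over known_terms with early return
def pvLoopA (ntext blob : String) : List (Option String) → Bool
  | [] => false
  | t :: rest =>
    let nt := pvNormalize t
    if PySem.Str.len nt < 3 then pvLoopA ntext blob rest
    else if PySem.Str.isIn nt ntext && !(PySem.Str.isIn nt blob) then true
    else pvLoopA ntext blob rest

def text_contains_unsupported_known_term_py (text : String) (source_texts : List (Option String)) (known_terms : List (Option String)) : Bool :=
  -- normalized_text / normalized_source_blob inlined into the loop call
  pvLoopA (pvNormalize (some text))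
    (PySem.Str.join " " ((source_texts.filter pvTruthy).map pvNormalize)) known_terms

-- ===== PORT B =====
-- (kt or "").strip().lower()
def pvNormB (v : Option String) : String := PySem.Str.lower (PySem.Str.strip (v.getD ""))

-- terms = {t for t in ((kt or "").strip().lower() for kt in known_terms) if len(t) >= 3}
-- (the set holds the strings as List Char, the convention's representation for proof work)
def pvTermsB (known_terms : List (Option String)) : PySem.Set (List Char) :=
  PySem.Set.ofList (((known_terms.map pvNormB).filter (fun t => decide (3 ≤ PySem.Str.len t))).map String.toList)

-- lengths = sorted({len(t) for t in terms})
def pvLengthsB (terms : PySem.Set (List Char)) : List Int :=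
  PySem.List.sorted (PySem.Set.ofList (terms.map (fun t => (t.length : Int)))) (fun x => x) false

-- the inner 'for L in lengths' loop with its break
def pvScanLens (terms : PySem.Set (List Char)) (s : List Char) (i : Int)
    (hits : PySem.Set (List Char)) : List Int → PySem.Set (List Char)
  | [] => hits
  | L :: rest =>
    if (s.length : Int) < i + L then hits  -- break
    else
      let sub := PySem.List.slice s (some i) (some (i + L))
      pvScanLens terms s i (if terms.contains sub then hits.add sub else hits) rest

-- occurring(s): sliding-window scan collecting the terms that occur in s
def pvOccurring (terms : PySem.Set (List Char)) (lengths : List Int) (s : List Char) : PySem.Set (List Char) :=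
  (PySem.List.pyRange 0 (s.length : Int) 1).foldl (fun hits i => pvScanLens terms s i hits lengths) PySem.Set.empty

def text_contains_unsupported_known_term_py_alt (text : String) (source_texts : List (Option String)) (known_terms : List (Option String)) : Bool :=
  -- terms / lengths / mentioned / blob inlined (terms = pvTermsB known_terms, etc.)
  if (pvTermsB known_terms).isEmpty then false
  else if (pvOccurring (pvTermsB known_terms) (pvLengthsB (pvTermsB known_terms))
      (PySem.Str.lower (PySem.Str.strip text)).toList).isEmpty then false
  else
    !(PySem.Set.issubset
      (pvOccurring (pvTermsB known_terms) (pvLengthsB (pvTermsB known_terms))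
        (PySem.Str.lower (PySem.Str.strip text)).toList)
      (pvOccurring (pvTermsB known_terms) (pvLengthsB (pvTermsB known_terms))
        (PySem.Str.join " " ((source_texts.filter pvTruthy).map pvNormB)).toList))

-- ===== PRECONDITION & SPEC =====
def Spec_text_contains_unsupported_known_term_py (text : String) (source_texts : List (Option String)) (known_terms : List (Option String)) (out : Bool) : Prop := out = text_contains_unsupported_known_term_py_alt text source_texts known_terms
instance (text : String) (source_texts : List (Option String)) (known_terms : List (Option String)) (out : Bool) : Decidable (Spec_text_contains_unsupported_known_term_py text source_texts known_terms out) := by unfold Spec_text_contains_unsupported_known_term_py; infer_instance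

-- ===== CLAIM =====
def Claim_equal_text_contains_unsupported_known_term_py : Prop := ∀ (text : String) (source_texts : List (Option String)) (known_terms : List (Option String)), Dom_text_contains_unsupported_known_term_py text source_texts known_terms → Spec_text_contains_unsupported_known_term_py text source_texts known_terms (text_contains_unsupported_known_term_py text source_texts known_terms)

-- ===== LEMMAS AND PROOFS =====
theorem pvNormB_eq (v : Option String) : pvNormB v = pvNormalize v := by
  cases v with
  | none => decide
  | some s =>
    simp only [pvNormB, pvNormalize, Option.getD_some]
    by_cases h : s == ""
    · rw [if_pos h]
      have hs : s = "" := beq_iff_eq.mp h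
      subst hs; decide
    · rw [if_neg h]

-- A's loop is an existential over the terms
theorem pvLoopA_eq_any (ntext blob : String) (ts : List (Option String)) :
    pvLoopA ntext blob ts = ts.any (fun t =>
      (decide (3 ≤ PySem.Str.len (pvNormalize t)) && PySem.Str.isIn (pvNormalize t) ntext)
        && !(PySem.Str.isIn (pvNormalize t) blob)) := by
  induction ts with
  | nil => rfl
  | cons t rest ih =>
    rw [List.any_cons, ← ih]
    simp only [pvLoopA]
    by_cases h3 : PySem.Str.len (pvNormalize t) < 3
    · rw [if_pos h3]
      have hd : decide (3 ≤ PySem.Str.len (pvNormalize t)) = false := by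
        simp only [decide_eq_false_iff_not]; omega
      rw [hd, Bool.false_and, Bool.false_and, Bool.false_or]
    · rw [if_neg h3]
      have hd : decide (3 ≤ PySem.Str.len (pvNormalize t)) = true := by
        simp only [decide_eq_true_eq]; omega
      rw [hd, Bool.true_and]
      by_cases hc : (PySem.Str.isIn (pvNormalize t) ntext && !(PySem.Str.isIn (pvNormalize t) blob)) = true
      · rw [if_pos hc, hc, Bool.true_or]
      · rw [Bool.not_eq_true] at hc
        rw [if_neg (by rw [hc]; exact Bool.false_ne_true), hc, Bool.false_or]

-- membership in B's term set
theorem mem_pvTermsB (kts : List (Option String)) (t : List Char) :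
    t ∈ pvTermsB kts ↔ 3 ≤ t.length ∧ ∃ kt ∈ kts, (pvNormB kt).toList = t := by
  unfold pvTermsB
  rw [PySem.Set.mem_ofList]
  simp only [List.mem_map, List.mem_filter, PySem.Str.len_eq, decide_eq_true_eq]
  constructor
  · rintro ⟨u, ⟨⟨kt, hkt, rfl⟩, hlen⟩, rfl⟩
    exact ⟨by exact_mod_cast hlen, kt, hkt, rfl⟩
  · rintro ⟨hlen, kt, hkt, rfl⟩
    exact ⟨pvNormB kt, ⟨⟨kt, hkt, rfl⟩, by exact_mod_cast hlen⟩, rfl⟩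

-- the inner loop: what ends up in hits
theorem pvScanLens_mem (terms : PySem.Set (List Char)) (s : List Char) (j : Nat)
    (ls : List Int) (hpair : ls.Pairwise (· < ·)) (hpos : ∀ L ∈ ls, 0 < L)
    (hits : PySem.Set (List Char)) (t : List Char) :
    t ∈ pvScanLens terms s (j : Int) hits ls ↔
      t ∈ hits ∨ (t ∈ terms ∧ ((t.length : Int) ∈ ls) ∧ j + t.length ≤ s.length ∧
        t = (s.drop j).take t.length) := by
  induction ls generalizing hits with
  | nil => simp [pvScanLens]
  | cons L rest ih =>
    obtain ⟨hL, hrest⟩ := List.pairwise_cons.mp hpair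
    have hLpos : 0 < L := hpos L (List.mem_cons_self ..)
    have hposr : ∀ L' ∈ rest, 0 < L' := fun L' h => hpos L' (List.mem_cons_of_mem _ h)
    simp only [pvScanLens]
    by_cases hbr : (s.length : Int) < (j : Int) + L
    · rw [if_pos hbr]
      constructor
      · exact Or.inl
      · rintro (h | ⟨hterm, hlen, hbnd, heq⟩)
        · exact h
        · exfalso
          rcases List.mem_cons.mp hlen with h1 | h1
          · omega
          · have := hL _ h1; omega
    · rw [if_neg hbr]
      push Not at hbr
      have hjL : (j : Int) + L = ((j + L.toNat : Nat) : Int) := by omega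
      have hsub : PySem.List.slice s (some (j : Int)) (some ((j : Int) + L))
          = (s.drop j).take L.toNat := by
        rw [hjL, PySem.List.slice_natCast]
        simp
      rw [hsub, ih hrest hposr]
      have hsubmem : ∀ h0 : PySem.Set (List Char),
          (t ∈ (if terms.contains ((s.drop j).take L.toNat) then h0.add ((s.drop j).take L.toNat) else h0)
            ↔ t ∈ h0 ∨ (t ∈ terms ∧ t = (s.drop j).take L.toNat)) := by
        intro h0
        split_ifs with hc
        · rw [PySem.Set.mem_add]
          constructor
          · rintro (h | h)
            · exact Or.inl h
            · exact Or.inr ⟨by rw [h]; exact (PySem.Set.contains_iff ..).mp hc, h⟩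
          · rintro (h | ⟨_, h⟩)
            · exact Or.inl h
            · exact Or.inr h
        · constructor
          · exact Or.inl
          · rintro (h | ⟨hterm, h⟩)
            · exact h
            · exact (hc ((PySem.Set.contains_iff ..).mpr (h ▸ hterm))).elim
      rw [hsubmem]
      have hbnd' : j + L.toNat ≤ s.length := by omega
      constructor
      · rintro ((h | ⟨hterm, heq⟩) | ⟨hterm, hlen, hb, heq⟩)
        · exact Or.inl h
        · have hlent : t.length = L.toNat := by
            rw [heq]
            simp only [List.length_take, List.length_drop]
            omega
          refine Or.inr ⟨hterm, List.mem_cons.mpr (Or.inl (by omega)), by omega, ?_⟩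
          rw [hlent]; exact heq
        · exact Or.inr ⟨hterm, List.mem_cons.mpr (Or.inr hlen), hb, heq⟩
      · rintro (h | ⟨hterm, hlen, hb, heq⟩)
        · exact Or.inl (Or.inl h)
        · rcases List.mem_cons.mp hlen with h1 | h1
          · have : L.toNat = t.length := by omega
            exact Or.inl (Or.inr ⟨hterm, by rw [this]; exact heq⟩)
          · exact Or.inr ⟨hterm, h1, hb, heq⟩

-- the outer loop over range(n)
theorem pvFold_mem (terms : PySem.Set (List Char)) (s : List Char)
    (ls : List Int) (hpair : ls.Pairwise (· < ·)) (hpos : ∀ L ∈ ls, 0 < L)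
    (n : Nat) (hits : PySem.Set (List Char)) (t : List Char) :
    t ∈ (List.range n).foldl (fun h (j : Nat) => pvScanLens terms s (j : Int) h ls) hits ↔
      t ∈ hits ∨ (t ∈ terms ∧ ((t.length : Int) ∈ ls) ∧
        ∃ j, j < n ∧ j + t.length ≤ s.length ∧ t = (s.drop j).take t.length) := by
  induction n generalizing hits with
  | zero => simp
  | succ n ihn =>
    rw [List.range_succ, List.foldl_append, List.foldl_cons, List.foldl_nil,
      pvScanLens_mem terms s n ls hpair hpos, ihn]
    constructor
    · rintro ((h | ⟨hterm, hlen, j, hj, hb, heq⟩) | ⟨hterm, hlen, hb, heq⟩)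
      · exact Or.inl h
      · exact Or.inr ⟨hterm, hlen, j, by omega, hb, heq⟩
      · exact Or.inr ⟨hterm, hlen, n, by omega, hb, heq⟩
    · rintro (h | ⟨hterm, hlen, j, hj, hb, heq⟩)
      · exact Or.inl (Or.inl h)
      · by_cases hjn : j = n
        · subst hjn; exact Or.inr ⟨hterm, hlen, hb, heq⟩
        · exact Or.inl (Or.inr ⟨hterm, hlen, j, by omega, hb, heq⟩)

-- occurring(s) is exactly the set of terms occurring as substrings of s
theorem pvOccurring_mem (terms : PySem.Set (List Char)) (ls : List Int) (s : List Char)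
    (hpair : ls.Pairwise (· < ·)) (hpos : ∀ L ∈ ls, 0 < L)
    (hlenin : ∀ u ∈ terms, ((u.length : Int) ∈ ls)) (hne : ∀ u ∈ terms, u ≠ []) (t : List Char) :
    t ∈ pvOccurring terms ls s ↔ t ∈ terms ∧ PySem.Chars.isIn t s = true := by
  unfold pvOccurring
  rw [PySem.List.pyRange_zero_natCast, List.foldl_map,
    pvFold_mem terms s ls hpair hpos s.length PySem.Set.empty t]
  constructor
  · rintro (h | ⟨hterm, _, j, _, hb, heq⟩)
    · exact absurd h (by simp [PySem.Set.empty])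
    · refine ⟨hterm, (PySem.Chars.exists_prefix_drop_iff_isIn t s).mp ⟨j, ?_⟩⟩
      exact List.prefix_iff_eq_take.mpr heq
  · rintro ⟨hterm, hin⟩
    obtain ⟨j, hpre⟩ := (PySem.Chars.exists_prefix_drop_iff_isIn t s).mpr hin
    have heq : t = (s.drop j).take t.length := List.prefix_iff_eq_take.mp hpre
    have hlt : t.length ≤ s.length - j := by
      have := hpre.length_le
      simpa using this
    have htpos : 0 < t.length := List.length_pos_iff.mpr (hne t hterm)
    exact Or.inr ⟨hterm, hlenin t hterm, j, by omega, by omega, heq⟩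

-- facts about the sorted distinct-lengths list of a term set
theorem pvLengthsB_pairwise (terms : PySem.Set (List Char)) :
    (pvLengthsB terms).Pairwise (· < ·) := by
  unfold pvLengthsB
  exact PySem.List.sorted_ofList_pairwise_lt (terms.map (fun t => (t.length : Int)))

theorem mem_pvLengthsB (terms : PySem.Set (List Char)) (u : List Char) (hu : u ∈ terms) :
    ((u.length : Int) ∈ pvLengthsB terms) := by
  unfold pvLengthsB
  rw [PySem.List.mem_sorted, PySem.Set.mem_ofList]
  exact List.mem_map.mpr ⟨u, hu, rfl⟩

-- ===== VERDICT (by name: the statement is the Claim_ definition above) =====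

theorem text_contains_unsupported_known_term_py_spec : Claim_equal_text_contains_unsupported_known_term_py := by
  intro text source_texts known_terms _
  unfold Spec_text_contains_unsupported_known_term_py
  unfold text_contains_unsupported_known_term_py text_contains_unsupported_known_term_py_alt
  rw [pvLoopA_eq_any]
  set terms := pvTermsB known_terms with hterms
  set ls := pvLengthsB terms with hls
  set ntext := pvNormalize (some text) with hntext
  set blob := PySem.Str.join " " ((source_texts.filter pvTruthy).map pvNormalize) with hblob
  have hblobB : PySem.Str.join " " ((source_texts.filter pvTruthy).map pvNormB) = blob := by
    rw [hblob]
    exact congrArg (PySem.Str.join " ") (List.map_congr_left (fun s _ => pvNormB_eq s))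
  have hntextB : PySem.Str.lower (PySem.Str.strip text) = ntext := pvNormB_eq (some text)
  rw [hblobB, hntextB]
  have hpair := pvLengthsB_pairwise terms
  have hlen3 : ∀ u ∈ terms, 3 ≤ u.length := fun u hu => ((mem_pvTermsB _ u).mp hu).1
  have hpos : ∀ L ∈ ls, 0 < L := by
    intro L hL
    rw [hls] at hL
    unfold pvLengthsB at hL
    rw [PySem.List.mem_sorted, PySem.Set.mem_ofList] at hL
    obtain ⟨u, hu, rfl⟩ := List.mem_map.mp hL
    have := hlen3 u hu; omega
  have hlenin : ∀ u ∈ terms, ((u.length : Int) ∈ ls) := fun u hu => mem_pvLengthsB terms u hu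
  have hne : ∀ u ∈ terms, u ≠ [] := by
    intro u hu h
    have := hlen3 u hu; subst h; simp at this
  have hocc := fun (s : List Char) (t : List Char) =>
    pvOccurring_mem terms ls s hpair hpos hlenin hne t
  -- the common existential both programs decide
  rw [Bool.eq_iff_iff, List.any_eq_true]
  have hEA : (∃ kt ∈ known_terms,
        ((decide (3 ≤ PySem.Str.len (pvNormalize kt)) && PySem.Str.isIn (pvNormalize kt) ntext)
          && !(PySem.Str.isIn (pvNormalize kt) blob)) = true) ↔
      (∃ t ∈ terms, PySem.Chars.isIn t ntext.toList = true ∧ PySem.Chars.isIn t blob.toList = false) := by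
    constructor
    · rintro ⟨kt, hkt, h⟩
      simp only [Bool.and_eq_true, Bool.not_eq_true', decide_eq_true_eq, PySem.Str.len_eq,
        PySem.Str.isIn_eq] at h
      refine ⟨(pvNormalize kt).toList, ?_, h.1.2, h.2⟩
      exact (mem_pvTermsB _ _).mpr ⟨by exact_mod_cast h.1.1, kt, hkt, by rw [pvNormB_eq]⟩
    · rintro ⟨t, ht, hin, hnotin⟩
      obtain ⟨hlen, kt, hkt, hteq⟩ := (mem_pvTermsB _ t).mp ht
      rw [pvNormB_eq] at hteq
      refine ⟨kt, hkt, ?_⟩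
      simp only [Bool.and_eq_true, Bool.not_eq_true', decide_eq_true_eq, PySem.Str.len_eq,
        PySem.Str.isIn_eq, hteq]
      exact ⟨⟨by exact_mod_cast hlen, hin⟩, hnotin⟩
  rw [hEA]
  -- now evaluate B's branches
  by_cases h1 : terms.isEmpty
  · rw [if_pos h1]
    have : terms = [] := List.isEmpty_iff.mp h1
    simp [this]
  · rw [if_neg h1]
    by_cases h2 : (pvOccurring terms ls ntext.toList).isEmpty
    · rw [if_pos h2]
      have hemp : pvOccurring terms ls ntext.toList = [] := List.isEmpty_iff.mp h2
      simp only [Bool.false_eq_true, iff_false, not_exists]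
      rintro t ⟨ht, hin, -⟩
      have : t ∈ pvOccurring terms ls ntext.toList := (hocc _ t).mpr ⟨ht, hin⟩
      rw [hemp] at this
      exact absurd this (List.not_mem_nil)
    · rw [if_neg h2]
      rw [Bool.not_eq_eq_eq_not, Bool.not_true, ← Bool.not_eq_true,
        PySem.Set.issubset_iff]
      push Not
      constructor
      · rintro ⟨t, ht, hin, hnotin⟩
        refine ⟨t, (hocc _ t).mpr ⟨ht, hin⟩, ?_⟩
        rw [hocc]
        rintro ⟨-, hbl⟩
        rw [hnotin] at hbl
        exact Bool.false_ne_true hbl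
      · rintro ⟨t, htm, hnot⟩
        obtain ⟨ht, hin⟩ := (hocc _ t).mp htm
        refine ⟨t, ht, hin, ?_⟩
        rw [Bool.eq_false_iff]
        intro hbl
        exact hnot ((hocc _ t).mpr ⟨ht, hbl⟩)
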